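-- pv_equiv track=rewrite | github.com/Arthurprnt/Minesweeper | grid.py | eventpostocoord
-- ===== SOURCE A (Python) =====
-- def eventpostocoord(mousecoord, oo_coords):
--     x, y = mousecoord
--     nb_x = 0
--     nb_y = 0
--     while x > oo_coords[0]:
--         x -= 45
--         nb_x += 1
--     while y > oo_coords[1]:
--         y -= 45
--         nb_y += 1
--     return nb_x-1, nb_y-1
-- ===== SOURCE B (Python) =====
-- def eventpostocoord(mousecoord, oo_coords):
--     nb_x = max(0, -((oo_coords[0] - mousecoord[0]) // 45))
--     nb_y = max(0, -((oo_coords[1] - mousecoord[1]) // 45))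
--     return nb_x - 1, nb_y - 1
-- ===== Notes on version B (the rewrite author's own statement) =====
-- stated objective: simpler
-- what changed: Replaces both subtract-by-45 counting loops with closed-form ceiling division (integer floor-division negated), clamped at 0 like the loops.
import Mathlib
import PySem

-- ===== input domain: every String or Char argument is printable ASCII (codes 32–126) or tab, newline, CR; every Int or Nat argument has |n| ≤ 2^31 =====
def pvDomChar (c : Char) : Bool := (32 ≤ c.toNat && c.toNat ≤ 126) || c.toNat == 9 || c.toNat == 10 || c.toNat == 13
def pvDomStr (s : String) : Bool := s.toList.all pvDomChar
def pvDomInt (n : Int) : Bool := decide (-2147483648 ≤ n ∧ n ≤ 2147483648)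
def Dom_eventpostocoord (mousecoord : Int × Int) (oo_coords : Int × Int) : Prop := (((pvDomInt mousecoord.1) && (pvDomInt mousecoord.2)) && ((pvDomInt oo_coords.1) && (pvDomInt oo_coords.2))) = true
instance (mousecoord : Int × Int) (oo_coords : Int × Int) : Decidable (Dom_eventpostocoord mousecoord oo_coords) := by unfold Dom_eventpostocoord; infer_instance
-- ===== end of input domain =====

-- B replaces A's two subtract-by-45 counting loops with a closed-form clamped ceiling division (objective: simpler, O(1)).

-- ===== PORT A =====
-- the 'while v > o: v -= 45; nb += 1' loop of A, as structural recursion on the gap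
def pvLoopA (v o : Int) : Int :=
  if o < v then pvLoopA (v - 45) o + 1 else 0
termination_by (v - o).toNat
decreasing_by omega

def eventpostocoord (mousecoord : Int × Int) (oo_coords : Int × Int) : Int × Int :=
  (pvLoopA mousecoord.1 oo_coords.1 - 1, pvLoopA mousecoord.2 oo_coords.2 - 1)

-- ===== PORT B =====
def eventpostocoord_alt (mousecoord : Int × Int) (oo_coords : Int × Int) : Int × Int :=
  (max 0 (-(PySem.Int.floordiv (oo_coords.1 - mousecoord.1) 45)) - 1,
   max 0 (-(PySem.Int.floordiv (oo_coords.2 - mousecoord.2) 45)) - 1)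

-- ===== PRECONDITION & SPEC =====
def Spec_eventpostocoord (mousecoord : Int × Int) (oo_coords : Int × Int) (out : Int × Int) : Prop := out = eventpostocoord_alt mousecoord oo_coords
instance (mousecoord : Int × Int) (oo_coords : Int × Int) (out : Int × Int) : Decidable (Spec_eventpostocoord mousecoord oo_coords out) := by unfold Spec_eventpostocoord; infer_instance

-- ===== CLAIM (what is proved, stated in full; the proofs are below) =====
def Claim_equal_eventpostocoord : Prop := ∀ (mousecoord : Int × Int) (oo_coords : Int × Int), Dom_eventpostocoord mousecoord oo_coords → Spec_eventpostocoord mousecoord oo_coords (eventpostocoord mousecoord oo_coords)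

-- ===== LEMMAS AND PROOFS =====
theorem pvLoopA_eq (v o : Int) : pvLoopA v o = max 0 (-(PySem.Int.floordiv (o - v) 45)) := by
  rw [pvLoopA]
  split_ifs with h
  · have ih := pvLoopA_eq (v - 45) o
    rw [ih]
    have h1 := PySem.Int.floordiv_mul_add_mod (o - v) 45
    have h2 := PySem.Int.mod_nonneg (o - v) (by norm_num : (0:Int) < 45)
    have h3 := PySem.Int.mod_lt (o - v) (by norm_num : (0:Int) < 45)
    have h4 := PySem.Int.floordiv_mul_add_mod (o - (v - 45)) 45
    have h5 := PySem.Int.mod_nonneg (o - (v - 45)) (by norm_num : (0:Int) < 45)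
    have h6 := PySem.Int.mod_lt (o - (v - 45)) (by norm_num : (0:Int) < 45)
    omega
  · have h1 := PySem.Int.floordiv_mul_add_mod (o - v) 45
    have h2 := PySem.Int.mod_nonneg (o - v) (by norm_num : (0:Int) < 45)
    have h3 := PySem.Int.mod_lt (o - v) (by norm_num : (0:Int) < 45)
    omega
termination_by (v - o).toNat
decreasing_by omega

-- ===== VERDICT (by name: the statement is the Claim_ definition above) =====
theorem eventpostocoord_spec : Claim_equal_eventpostocoord := by
  intro m o _
  unfold Spec_eventpostocoord eventpostocoord eventpostocoord_alt
  rw [pvLoopA_eq, pvLoopA_eq]
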